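-- pv_equiv track=rewrite | github.com/RezuanMustafaHasan/Photon | FastAPI/graph/simple_graph.py | build_checkpoint_indexes
-- ===== SOURCE A (Python) =====
-- def checkpoint_interval_for_lesson(total_topics):
--     if total_topics <= 2:
--         return 1
--     if total_topics <= 4:
--         return 2
--     return 3
--
-- def build_checkpoint_indexes(topic_count):
--     if topic_count <= 0:
--         return []
--
--     interval = checkpoint_interval_for_lesson(topic_count)
--     indexes = {topic_count - 1}
--     for index in range(topic_count):
--         if interval > 0 and (index + 1) % interval == 0:
--             indexes.add(index)
--     return sorted(indexes)
-- ===== SOURCE B (Python) =====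
-- def checkpoint_interval_for_lesson(total_topics):
--     if total_topics <= 2:
--         return 1
--     if total_topics <= 4:
--         return 2
--     return 3
--
--
-- def build_checkpoint_indexes(topic_count):
--     if topic_count <= 0:
--         return []
--     interval = checkpoint_interval_for_lesson(topic_count)
--     result = list(range(interval - 1, topic_count, interval))
--     if topic_count - 1 not in result:
--         result.append(topic_count - 1)
--     return result
-- ===== Notes on version B (the rewrite author's own statement) =====
-- stated objective: simpler
-- what changed: B generates the checkpoint indices directly as the arithmetic progression range(interval-1, topic_count, interval) and appends topic_count-1 only when missing, replacing A's set accumulation over the full range, modulo test and final sort.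
import Mathlib
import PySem

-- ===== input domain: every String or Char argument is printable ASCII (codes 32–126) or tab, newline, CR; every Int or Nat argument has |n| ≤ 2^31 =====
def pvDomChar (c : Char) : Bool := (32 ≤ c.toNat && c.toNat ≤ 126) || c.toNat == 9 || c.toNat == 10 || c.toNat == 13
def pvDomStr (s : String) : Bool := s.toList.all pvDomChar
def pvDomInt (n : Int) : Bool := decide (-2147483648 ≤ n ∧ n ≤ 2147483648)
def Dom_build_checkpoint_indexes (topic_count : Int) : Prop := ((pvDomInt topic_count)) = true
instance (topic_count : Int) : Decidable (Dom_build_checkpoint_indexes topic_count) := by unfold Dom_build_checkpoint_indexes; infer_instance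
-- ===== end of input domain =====

-- B replaces A's full-range modulo scan + set + sort by directly generating the arithmetic
-- progression of checkpoint positions (already sorted), appending the last index when missing.


-- ===== PORT A =====
def checkpoint_interval_for_lesson (total_topics : Int) : Int :=
  if total_topics ≤ 2 then 1
  else if total_topics ≤ 4 then 2
  else 3

def build_checkpoint_indexes (topic_count : Int) : List Int :=
  if topic_count ≤ 0 then []
  else
    let interval := checkpoint_interval_for_lesson topic_count
    let indexes : PySem.Set Int :=
      (PySem.List.pyRange 0 topic_count 1).foldl
        (fun acc index =>
          if 0 < interval ∧ PySem.Int.mod (index + 1) interval = 0 then acc.add index else acc)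
        (PySem.Set.ofList [topic_count - 1])
    PySem.List.sorted indexes (fun x => x)

-- ===== PORT B =====
def checkpoint_interval_for_lesson_alt (total_topics : Int) : Int :=
  if total_topics ≤ 2 then 1
  else if total_topics ≤ 4 then 2
  else 3

def build_checkpoint_indexes_alt (topic_count : Int) : List Int :=
  if topic_count ≤ 0 then []
  else
    let interval := checkpoint_interval_for_lesson_alt topic_count
    let result := PySem.List.pyRange (interval - 1) topic_count interval
    if topic_count - 1 ∈ result then result else result ++ [topic_count - 1]

-- ===== PRECONDITION & SPEC =====
def Spec_build_checkpoint_indexes (topic_count : Int) (out : List Int) : Prop := out = build_checkpoint_indexes_alt topic_count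
instance (topic_count : Int) (out : List Int) : Decidable (Spec_build_checkpoint_indexes topic_count out) := by unfold Spec_build_checkpoint_indexes; infer_instance

-- ===== CLAIM (what is proved, stated in full; the proofs are below) =====
def Claim_equal_build_checkpoint_indexes : Prop := ∀ (topic_count : Int), Dom_build_checkpoint_indexes topic_count → Spec_build_checkpoint_indexes topic_count (build_checkpoint_indexes topic_count)

-- ===== LEMMAS AND PROOFS =====

-- membership in A's accumulated set
theorem mem_loop (k : Int) (l : List Int) (init : PySem.Set Int) (x : Int) :
    x ∈ l.foldl
        (fun acc index =>
          if 0 < k ∧ PySem.Int.mod (index + 1) k = 0 then PySem.Set.add acc index else acc)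
        init
      ↔ x ∈ init ∨ (x ∈ l ∧ 0 < k ∧ PySem.Int.mod (x + 1) k = 0) := by
  induction l generalizing init with
  | nil => simp
  | cons a l ih =>
    simp only [List.foldl_cons, ih, List.mem_cons]
    split_ifs with h
    · simp only [PySem.Set.mem_add]
      constructor
      · rintro ((hi | rfl) | hl)
        · exact Or.inl hi
        · exact Or.inr ⟨Or.inl rfl, h⟩
        · exact Or.inr ⟨Or.inr hl.1, hl.2⟩
      · rintro (hi | ⟨(rfl | hl), hc⟩)
        · exact Or.inl (Or.inl hi)
        · exact Or.inl (Or.inr rfl)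
        · exact Or.inr ⟨hl, hc⟩
    · constructor
      · rintro (hi | hl)
        · exact Or.inl hi
        · exact Or.inr ⟨Or.inr hl.1, hl.2⟩
      · rintro (hi | ⟨(rfl | hl), hc⟩)
        · exact Or.inl hi
        · exact absurd hc h
        · exact Or.inr ⟨hl, hc⟩

theorem nodup_loop (k : Int) (l : List Int) (init : PySem.Set Int) (h : init.Nodup) :
    (l.foldl
        (fun acc index =>
          if 0 < k ∧ PySem.Int.mod (index + 1) k = 0 then PySem.Set.add acc index else acc)
        init).Nodup := by
  induction l generalizing init with
  | nil => exact h
  | cons a l ih =>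
    simp only [List.foldl_cons]
    split_ifs with hc
    · exact ih _ (PySem.Set.nodup_add init a h)
    · exact ih _ h

-- B's list is strictly increasing
theorem pairwise_lt_pyRange (a b k : Int) (hk : 0 < k) :
    (PySem.List.pyRange a b k).Pairwise (· < ·) := by
  rw [PySem.List.pyRange_of_pos a b hk]
  refine List.Pairwise.map _ ?_ (List.pairwise_lt_range)
  intro m n hmn
  have : (m : Int) < (n : Int) := by exact_mod_cast hmn
  nlinarith

theorem pairwise_lt_alt (topic_count : Int) :
    (build_checkpoint_indexes_alt topic_count).Pairwise (· < ·) := by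
  unfold build_checkpoint_indexes_alt
  split_ifs with h0
  · simp
  · push Not at h0
    set k := checkpoint_interval_for_lesson_alt topic_count with hkdef
    have hk : 0 < k := by
      unfold checkpoint_interval_for_lesson_alt at hkdef
      rw [hkdef]; split_ifs <;> norm_num
    simp only []
    split_ifs with hmem
    · exact pairwise_lt_pyRange _ _ _ hk
    · rw [List.pairwise_append]
      refine ⟨pairwise_lt_pyRange _ _ _ hk, by simp, ?_⟩
      intro a ha b hb
      simp only [List.mem_singleton] at hb
      subst hb
      have := (PySem.List.mem_pyRange_iff_of_pos hk a).mp ha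
      have hne : a ≠ topic_count - 1 := fun he => hmem (he ▸ ha)
      omega

theorem mem_alt (topic_count : Int) (h0 : 0 < topic_count) (x : Int) :
    x ∈ build_checkpoint_indexes_alt topic_count ↔
      x ∈ PySem.List.pyRange (checkpoint_interval_for_lesson_alt topic_count - 1) topic_count
            (checkpoint_interval_for_lesson_alt topic_count) ∨ x = topic_count - 1 := by
  unfold build_checkpoint_indexes_alt
  rw [if_neg (by omega)]
  simp only []
  split_ifs with hmem
  · constructor
    · exact Or.inl
    · rintro (hx | rfl)
      · exact hx
      · exact hmem
  · simp

-- ===== VERDICT helper =====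
theorem main_eq (topic_count : Int) :
    build_checkpoint_indexes topic_count = build_checkpoint_indexes_alt topic_count := by
  by_cases h0 : topic_count ≤ 0
  · unfold build_checkpoint_indexes build_checkpoint_indexes_alt
    rw [if_pos h0, if_pos h0]
  · push Not at h0
    have hsame : checkpoint_interval_for_lesson_alt topic_count
        = checkpoint_interval_for_lesson topic_count := rfl
    set k := checkpoint_interval_for_lesson topic_count with hkdef
    have hk : 0 < k := by
      unfold checkpoint_interval_for_lesson at hkdef
      rw [hkdef]; split_ifs <;> norm_num
    have hkle : k ≤ topic_count := by
      unfold checkpoint_interval_for_lesson at hkdef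
      rw [hkdef]; split_ifs <;> omega
    unfold build_checkpoint_indexes
    rw [if_neg (by omega)]
    simp only []
    apply PySem.List.sorted_eq_of_perm_of_pairwise_lt
    · -- permutation
      have hnodupS := nodup_loop k (PySem.List.pyRange 0 topic_count 1)
        (PySem.Set.ofList [topic_count - 1]) (PySem.Set.nodup_ofList _)
      have hnodupL : (build_checkpoint_indexes_alt topic_count).Nodup :=
        (pairwise_lt_alt topic_count).imp (fun h => ne_of_lt h)
      rw [List.perm_ext_iff_of_nodup hnodupL hnodupS]
      intro x
      rw [mem_alt topic_count h0 x, mem_loop, PySem.Set.mem_ofList, hsame]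
      simp only [List.mem_singleton]
      rw [PySem.List.mem_pyRange_iff_of_pos hk x,
        PySem.List.mem_pyRange_iff_of_pos (by norm_num : (0:Int) < 1) x,
        PySem.Int.mod_eq_zero_iff_dvd]
      constructor
      · rintro (⟨hle, hlt, c, hc⟩ | rfl)
        · refine Or.inr ⟨⟨by omega, hlt, one_dvd _⟩, hk, c + 1, by linarith⟩
        · exact Or.inl rfl
      · rintro (rfl | ⟨⟨hge, hlt, -⟩, -, c, hc⟩)
        · exact Or.inr rfl
        · have hcpos : k ≤ x + 1 := Int.le_of_dvd (by omega) ⟨c, hc⟩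
          exact Or.inl ⟨by omega, hlt, c - 1, by linarith⟩
    · exact pairwise_lt_alt topic_count

-- ===== VERDICT (by name: the statement is the Claim_ definition above) =====
theorem build_checkpoint_indexes_spec : Claim_equal_build_checkpoint_indexes := by
  intro topic_count _
  unfold Spec_build_checkpoint_indexes
  exact main_eq topic_count
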